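/- GENERATED by c/gen_decode.py: decode facts of the image, one per distinct instruction byte string. -/
import UserX.DecodeImage

#decode_all ProgX.Base.Dec
  "01c1"  -- add ecx,eax
  "415d"  -- pop r13
  "4881ff3f008000"  -- cmp rdi,0x80003f
  "4889ba20008000"  -- mov QWORD PTR [rdx+0x800020],rdi
  "488b3c2500f01f00"  -- mov rdi,QWORD PTR ds:0x1ff000
  "490fafed"  -- imul rbp,r13
  "4c396bf0"  -- cmp QWORD PTR [rbx-0x10],r13
  "660f28ca"  -- movapd xmm1,xmm2
  "66480f6efb"  -- movq xmm7,rbx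
  "74d0"  -- je 1015fe
  "7999"  -- jns 101321
  "89c3"  -- mov ebx,eax
  "bf02fcffff"  -- mov edi,0xfffffc02
  "e878f9ffff"  -- call 101e60
  "e8e60e0000"  -- call 104100
  "ebbe"  -- jmp 102a99
  "f20f110c24"  -- movsd QWORD PTR [rsp],xmm1
  "f20f5905e0df0300"  -- mulsd xmm0,QWORD PTR [rip+0x3dfe0]
  "f20f5e150ce00300"  -- divsd xmm2,QWORD PTR [rip+0x3e00c]
  "ff13"  -- call QWORD PTR [rbx]
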